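-- pv_equiv track=rewrite | github.com/ztbrown/crankiac | scripts/bump_version.py | analyze_commits
-- ===== SOURCE A (Python) =====
-- from typing import Literal, Optional
--
-- BumpLevel = Literal["patch", "minor", "major"]
--
-- COMMIT_BUMP_MAP: dict[str, BumpLevel] = {
--     "feat": "minor",
--     "fix": "patch",
--     "docs": "patch",
--     "refactor": "patch",
--     "test": "patch",
--     "chore": "patch",
--     "perf": "patch",
--     "style": "patch",
--     "ci": "patch",
--     "build": "patch",
-- }
--
-- def analyze_commits(commits: list[str]) -> BumpLevel:
--     """Analyze commits to determine the appropriate bump level."""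
--     max_level: BumpLevel = "patch"
--
--     for commit in commits:
--         commit_lower = commit.lower()
--
--         # Check for breaking changes
--         if commit_lower.startswith("breaking:") or "breaking change:" in commit_lower:
--             return "major"
--
--         # Check for conventional commit prefixes
--         for prefix, level in COMMIT_BUMP_MAP.items():
--             if commit_lower.startswith(f"{prefix}:") or commit_lower.startswith(f"{prefix}("):
--                 if level == "minor" and max_level == "patch":
--                     max_level = "minor"
--                 break
--
--     return max_level
-- ===== SOURCE B (Python) =====
-- def _is_breaking(commit: str) -> bool:
--     cl = commit.lower()
--     return cl.startswith("breaking:") or "breaking change:" in cl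
--
--
-- def _is_feat(commit: str) -> bool:
--     cl = commit.lower()
--     return cl.startswith("feat:") or cl.startswith("feat(")
--
--
-- def analyze_commits(commits: list[str]) -> str:
--     """Two independent scans: breaking -> major, feat -> minor, else patch."""
--     if any(_is_breaking(c) for c in commits):
--         return "major"
--     if any(_is_feat(c) for c in commits):
--         return "minor"
--     return "patch"
-- ===== Notes on version B (the rewrite author's own statement) =====
-- stated objective: simpler
-- what changed: Replaces the single stateful pass with a running max_level and a full prefix-map inner loop by two independent boolean scans (any breaking -> major, any feat:/feat( -> minor, else patch), dropping the accumulator and the map entirely.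
import Mathlib
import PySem

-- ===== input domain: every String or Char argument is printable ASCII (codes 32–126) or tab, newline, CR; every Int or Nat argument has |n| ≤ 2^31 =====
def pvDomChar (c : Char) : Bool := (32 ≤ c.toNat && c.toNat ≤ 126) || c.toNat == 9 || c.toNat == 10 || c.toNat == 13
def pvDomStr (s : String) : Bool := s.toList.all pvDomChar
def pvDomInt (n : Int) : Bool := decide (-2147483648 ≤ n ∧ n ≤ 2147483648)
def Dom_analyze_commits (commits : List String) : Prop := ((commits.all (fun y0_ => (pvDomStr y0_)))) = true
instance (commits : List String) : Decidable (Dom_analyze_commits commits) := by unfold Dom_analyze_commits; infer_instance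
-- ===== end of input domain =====

-- B does the same job with two independent boolean scans instead of A's stateful
-- single pass over the full prefix map; return values agree on all inputs (objective: simpler).

-- ===== PORT A =====
-- COMMIT_BUMP_MAP in insertion order (keys as char lists so the f-string concat stays kernel-transparent)
def pvBumpMap : List (List Char × String) :=
  [("feat".toList, "minor"), ("fix".toList, "patch"), ("docs".toList, "patch"),
   ("refactor".toList, "patch"), ("test".toList, "patch"), ("chore".toList, "patch"),
   ("perf".toList, "patch"), ("style".toList, "patch"), ("ci".toList, "patch"),
   ("build".toList, "patch")]

-- the inner 'for prefix, level in COMMIT_BUMP_MAP.items(): … break' loop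
def pvInnerLoop (cl : List Char) (max_level : String) : List (List Char × String) → String
  | [] => max_level
  | (pfx, level) :: rest =>
    if PySem.Chars.startswith cl (pfx ++ ":".toList) || PySem.Chars.startswith cl (pfx ++ "(".toList) then
      (if level == "minor" && max_level == "patch" then "minor" else max_level)
    else pvInnerLoop cl max_level rest

-- the outer 'for commit in commits' loop with the running max_level and mid-loop return
def pvOuterLoop (max_level : String) : List String → String
  | [] => max_level
  | commit :: rest =>
    let cl := PySem.Chars.lower commit.toList
    if PySem.Chars.startswith cl "breaking:".toList || PySem.Chars.isIn "breaking change:".toList cl then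
      "major"
    else pvOuterLoop (pvInnerLoop cl max_level pvBumpMap) rest

def analyze_commits (commits : List String) : String := pvOuterLoop "patch" commits

-- ===== PORT B =====
def pvIsBreaking (commit : String) : Bool :=
  let cl := PySem.Chars.lower commit.toList
  PySem.Chars.startswith cl "breaking:".toList || PySem.Chars.isIn "breaking change:".toList cl

def pvIsFeat (commit : String) : Bool :=
  let cl := PySem.Chars.lower commit.toList
  PySem.Chars.startswith cl "feat:".toList || PySem.Chars.startswith cl "feat(".toList

def analyze_commits_alt (commits : List String) : String :=
  if commits.any pvIsBreaking then "major"
  else if commits.any pvIsFeat then "minor"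
  else "patch"

-- ===== PRECONDITION & SPEC =====
def Spec_analyze_commits (commits : List String) (out : String) : Prop := out = analyze_commits_alt commits
instance (commits : List String) (out : String) : Decidable (Spec_analyze_commits commits out) := by unfold Spec_analyze_commits; infer_instance

-- ===== CLAIM (what is proved, stated in full; the proofs are below) =====
def Claim_equal_analyze_commits : Prop := ∀ (commits : List String), Dom_analyze_commits commits → Spec_analyze_commits commits (analyze_commits commits)

-- ===== LEMMAS AND PROOFS =====
-- a run of the inner loop over entries whose level is "patch" never changes max_level
theorem pvInnerLoop_all_patch (cl : List Char) (m : String) :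
    ∀ l : List (List Char × String), (∀ x ∈ l, x.2 = "patch") → pvInnerLoop cl m l = m := by
  intro l h
  induction l with
  | nil => rfl
  | cons x rest ih =>
    obtain ⟨p, s⟩ := x
    have hs : s = "patch" := h (p, s) (by simp)
    subst hs
    show (if _ then (if ("patch" == "minor" && m == "patch") then "minor" else m) else pvInnerLoop cl m rest) = m
    split
    · simp
    · exact ih (fun y hy => h y (List.mem_cons_of_mem _ hy))

-- the inner loop only ever promotes on a feat match, and only from "patch"
theorem pvInnerLoop_eq (cl : List Char) (m : String) :
    pvInnerLoop cl m pvBumpMap =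
      if PySem.Chars.startswith cl "feat:".toList || PySem.Chars.startswith cl "feat(".toList then
        (if m == "patch" then "minor" else m)
      else m := by
  have e1 : ("feat".toList ++ ":".toList) = "feat:".toList := rfl
  have e2 : ("feat".toList ++ "(".toList) = "feat(".toList := rfl
  show (if PySem.Chars.startswith cl ("feat".toList ++ ":".toList)
          || PySem.Chars.startswith cl ("feat".toList ++ "(".toList) then
          (if ("minor" == "minor" && m == "patch") then "minor" else m)
        else pvInnerLoop cl m _) = _
  rw [e1, e2]
  split
  · simp
  · rw [pvInnerLoop_all_patch cl m _ (by decide)]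

theorem pvOuterLoop_eq (commits : List String) :
    ∀ m, m = "patch" ∨ m = "minor" →
      pvOuterLoop m commits =
        (if commits.any pvIsBreaking then "major"
         else if (m == "minor" || commits.any pvIsFeat) then "minor"
         else "patch") := by
  induction commits with
  | nil =>
    intro m hm
    rcases hm with h | h <;> simp [pvOuterLoop, h]
  | cons c rest ih =>
    intro m hm
    show (if pvIsBreaking c then "major"
          else pvOuterLoop (pvInnerLoop (PySem.Chars.lower c.toList) m pvBumpMap) rest) = _
    by_cases hb : pvIsBreaking c
    · simp [hb]
    · rw [if_neg hb, pvInnerLoop_eq]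
      by_cases hf : pvIsFeat c
      · have hf' : (PySem.Chars.startswith (PySem.Chars.lower c.toList) "feat:".toList
            || PySem.Chars.startswith (PySem.Chars.lower c.toList) "feat(".toList) = true := hf
        rw [if_pos hf']
        have hmin : (if m == "patch" then "minor" else m) = "minor" := by
          rcases hm with h | h <;> simp [h]
        rw [hmin, ih "minor" (Or.inr rfl)]
        simp [hb, hf]
      · have hf' : ¬ ((PySem.Chars.startswith (PySem.Chars.lower c.toList) "feat:".toList
            || PySem.Chars.startswith (PySem.Chars.lower c.toList) "feat(".toList) = true) := hf
        rw [if_neg hf', ih m hm]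
        simp [hb, hf]

-- ===== VERDICT (by name: the statement is the Claim_ definition above) =====
theorem analyze_commits_spec : Claim_equal_analyze_commits := by
  intro commits _
  unfold Spec_analyze_commits analyze_commits analyze_commits_alt
  rw [pvOuterLoop_eq commits "patch" (Or.inl rfl)]
  simp
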